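-- pv_equiv track=rewrite | github.com/Saztroz/leet_code_problems | first_recurring_char.py | first_Recurring
-- ===== SOURCE A (Python) =====
-- def first_Recurring(arr):
--     min_dist = len(arr)
--     value = arr[0]
--     recurringFound = False
--
--     for i in range(len(arr)):
--         for j in range(i+1, len(arr)):
--             if arr[i] == arr[j]:
--                 distance = j - i
--                 if distance < min_dist:
--                     min_dist = distance
--                     value = arr[i]
--                     recurringFound = True
--     if recurringFound:
--         return value
--     else:
--         return 'Undefined'
-- ===== SOURCE B (Python) =====
-- def first_Recurring(arr):
--     best = None          # (gap, value) of the closest recurring pair seen so far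
--     last = {}            # value -> index of its most recent occurrence
--     for j, x in enumerate(arr):
--         if x in last and (best is None or j - last[x] < best[0]):
--             best = (j - last[x], x)
--         last[x] = j
--     return 'Undefined' if best is None else best[1]
-- ===== Notes on version B (the rewrite author's own statement) =====
-- stated objective: faster
-- what changed: Replaced the quadratic all-pairs double loop by a single pass that keeps a dict of each value's last-seen index and tracks the minimal gap (strict <, so earliest minimal pair wins, matching A's tie-breaking).
import Mathlib
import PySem

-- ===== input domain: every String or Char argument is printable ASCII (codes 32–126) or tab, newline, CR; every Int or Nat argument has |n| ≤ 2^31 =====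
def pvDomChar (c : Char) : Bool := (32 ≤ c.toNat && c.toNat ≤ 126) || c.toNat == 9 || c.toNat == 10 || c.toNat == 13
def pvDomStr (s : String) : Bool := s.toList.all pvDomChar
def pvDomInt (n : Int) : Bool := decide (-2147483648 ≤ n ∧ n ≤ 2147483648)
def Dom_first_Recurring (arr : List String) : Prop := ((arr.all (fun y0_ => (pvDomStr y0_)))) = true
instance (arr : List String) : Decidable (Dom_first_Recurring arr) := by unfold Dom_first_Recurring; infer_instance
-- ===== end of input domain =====

-- B replaces A's quadratic all-pairs scan by one pass with a dict of last-seen indices (asymptotically faster);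
-- the equivalence proved is about the return value on non-empty lists (A raises IndexError on []).

-- ===== PORT A =====
-- literal port of A; loop indices are always in range, so arr[i] is pyGetD;
-- 'value = arr[0]' is pyGet? (none exactly when Python raises IndexError; Pre_ excludes that input).
def first_Recurring (arr : List String) : String :=
  let n : Int := PySem.List.len arr
  let value0 : String := (PySem.List.pyGet? arr 0).getD ""
  let st :=
    (PySem.List.pyRange 0 n 1).foldl (fun (s : Int × String × Bool) i =>
      (PySem.List.pyRange (i+1) n 1).foldl (fun (s : Int × String × Bool) j =>
        if PySem.List.pyGetD arr i "" = PySem.List.pyGetD arr j "" then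
          let distance := j - i
          if distance < s.1 then (distance, PySem.List.pyGetD arr i "", true) else s
        else s) s) (n, value0, false)
  if st.2.2 then st.2.1 else "Undefined"

-- ===== PORT B =====
-- B-side helper: B's single loop over enumerate(arr) with state (best, last-seen dict).
def pvBstate (arr : List String) : Option (Int × String) × PySem.Dict String Int :=
  (PySem.List.enumerate arr 0).foldl
    (fun (s : Option (Int × String) × PySem.Dict String Int) p =>
      let best :=
        match s.2.get? p.2 with
        | none => s.1
        | some i =>
          match s.1 with
          | none => some (p.1 - i, p.2)
          | some b => if p.1 - i < b.1 then some (p.1 - i, p.2) else some b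
      (best, s.2.insert p.2 p.1)) (none, PySem.Dict.empty)

def first_Recurring_alt (arr : List String) : String :=
  match (pvBstate arr).1 with
  | none => "Undefined"
  | some b => b.2

-- ===== PRECONDITION & SPEC =====
-- Pre_ excludes exactly the empty list, on which Python A raises IndexError at 'arr[0]'.
def Pre_first_Recurring (arr : List String) : Prop := arr ≠ []
instance (arr : List String) : Decidable (Pre_first_Recurring arr) := by unfold Pre_first_Recurring; infer_instance
def pvWitness_first_Recurring : List String := ["a", "b", "a"]

def Spec_first_Recurring (arr : List String) (out : String) : Prop := out = first_Recurring_alt arr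
instance (arr : List String) (out : String) : Decidable (Spec_first_Recurring arr out) := by unfold Spec_first_Recurring; infer_instance

-- ===== CLAIM (what is proved, stated in full; the proofs are below) =====
def Claim_equal_first_Recurring : Prop := ∀ (arr : List String), Dom_first_Recurring arr → Pre_first_Recurring arr → Spec_first_Recurring arr (first_Recurring arr)

-- ===== LEMMAS AND PROOFS =====

-- Abstractions: both loops are a strict-min fold over a list of candidate (gap, value) pairs.
def pvAstep (s : Int × String × Bool) (p : Int × String) : Int × String × Bool :=
  if p.1 < s.1 then (p.1, p.2, true) else s

def pvBstep (b : Option (Int × String)) (p : Int × String) : Option (Int × String) :=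
  match b with
  | none => some p
  | some q => if p.1 < q.1 then some p else some q

def pvBest (l : List (Int × String)) : Option (Int × String) := l.foldl pvBstep none

def pvOut : Option (Int × String) → String
  | none => "Undefined"
  | some q => q.2

def pvEmb (n0 : Int) (v0 : String) : Option (Int × String) → Int × String × Bool
  | none => (n0, v0, false)
  | some q => (q.1, q.2, true)

def pvCand (arr : List String) (i j : Nat) : Option (Int × String) :=
  if arr.getD i "" = arr.getD j "" then some ((j : Int) - (i : Int), arr.getD i "") else none

-- all pairs (i, j), i < j, in A's lexicographic scan order
def pvCandsA (arr : List String) : List (Int × String) :=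
  (List.range arr.length).flatMap (fun i =>
    (List.range' (i+1) (arr.length - (i+1))).filterMap (pvCand arr i))

-- last index < j holding x
def pvLast (arr : List String) (j : Nat) (x : String) : Option Nat :=
  ((List.range j).filter (fun i => arr.getD i "" = x)).getLast?

-- consecutive-occurrence pairs in B's scan order (by right endpoint)
def pvCandsB (arr : List String) : List (Int × String) :=
  (List.range arr.length).flatMap (fun j =>
    match pvLast arr j (arr.getD j "") with
    | some i => [((j : Int) - (i : Int), arr.getD j "")]
    | none => [])

-- ----- generic facts about the strict-min fold -----
theorem pv_rel_fold (l : List (Int × String)) (n0 : Int) (v0 : String) :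
    ∀ b : Option (Int × String), (∀ p ∈ l, p.1 < n0) →
      l.foldl pvAstep (pvEmb n0 v0 b) = pvEmb n0 v0 (l.foldl pvBstep b) := by
  induction l with
  | nil => intro b _; rfl
  | cons p t ih =>
    intro b hb
    have hp : p.1 < n0 := hb p (by simp)
    have hstep : pvAstep (pvEmb n0 v0 b) p = pvEmb n0 v0 (pvBstep b p) := by
      cases b with
      | none => simp [pvAstep, pvEmb, pvBstep, hp]
      | some q =>
        simp only [pvAstep, pvEmb, pvBstep]
        split_ifs <;> rfl
    simpa [List.foldl_cons, hstep] using ih (pvBstep b p) (fun q hq => hb q (by simp [hq]))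

theorem pv_bfold_mem (l : List (Int × String)) :
    ∀ b, l.foldl pvBstep b = b ∨ ∃ q ∈ l, l.foldl pvBstep b = some q := by
  induction l with
  | nil => intro b; left; rfl
  | cons p t ih =>
    intro b
    rcases ih (pvBstep b p) with h | ⟨q, hq, h⟩
    · rw [List.foldl_cons, h]
      cases b with
      | none => exact Or.inr ⟨p, by simp, by simp [pvBstep]⟩
      | some q0 =>
        simp only [pvBstep]
        split_ifs
        · exact Or.inr ⟨p, by simp, rfl⟩
        · left; rfl
    · exact Or.inr ⟨q, by simp [hq], by simpa [List.foldl_cons] using h⟩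

theorem pv_bfold_keep (l : List (Int × String)) (p : Int × String)
    (h : ∀ q ∈ l, p.1 ≤ q.1) : l.foldl pvBstep (some p) = some p := by
  induction l with
  | nil => rfl
  | cons q t ih =>
    have hq : p.1 ≤ q.1 := h q (by simp)
    have : pvBstep (some p) q = some p := by
      simp only [pvBstep]
      split_ifs with hlt
      · omega
      · rfl
    rw [List.foldl_cons, this]
    exact ih (fun r hr => h r (by simp [hr]))

theorem pv_best_split (l₁ l₂ : List (Int × String)) (p : Int × String)
    (h₁ : ∀ q ∈ l₁, p.1 < q.1) (h₂ : ∀ q ∈ l₂, p.1 ≤ q.1) :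
    pvBest (l₁ ++ p :: l₂) = some p := by
  unfold pvBest
  rw [List.foldl_append, List.foldl_cons]
  have hstep : pvBstep (l₁.foldl pvBstep none) p = some p := by
    rcases pv_bfold_mem l₁ none with h | ⟨q, hq, h⟩
    · rw [h]; rfl
    · rw [h]
      simp only [pvBstep]
      split_ifs with hlt
      · rfl
      · exact absurd (h₁ q hq) (by omega)
  rw [hstep]
  exact pv_bfold_keep l₂ p h₂

-- ----- pvLast facts -----
theorem pv_getLast_max (L : List Nat) (hL : L.Pairwise (· < ·)) (a : Nat)
    (ha : L.getLast? = some a) : ∀ b ∈ L, b ≤ a := by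
  induction L with
  | nil => simp at ha
  | cons h t ih =>
    cases t with
    | nil =>
      simp only [List.getLast?_singleton, Option.some.injEq] at ha
      intro b hb
      simp only [List.mem_singleton] at hb
      omega
    | cons h2 t2 =>
      rw [List.getLast?_cons_cons] at ha
      have hpt : (h2 :: t2).Pairwise (· < ·) := hL.of_cons
      intro b hb
      rcases List.mem_cons.mp hb with rfl | hb'
      · have hma : a ∈ h2 :: t2 := List.mem_of_getLast? ha
        have : b < a := (List.pairwise_cons.mp hL).1 a hma
        omega
      · exact ih hpt ha b hb'

theorem pvLast_mem (arr : List String) (j : Nat) (x : String) (i : Nat)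
    (h : pvLast arr j x = some i) : i < j ∧ arr.getD i "" = x := by
  have hi := List.mem_of_getLast? h
  rw [List.mem_filter, List.mem_range] at hi
  exact ⟨hi.1, of_decide_eq_true hi.2⟩

theorem pvLast_ge (arr : List String) (j : Nat) (x : String) (i : Nat)
    (h : pvLast arr j x = some i) : ∀ k, k < j → arr.getD k "" = x → k ≤ i := by
  intro k hk hx
  have hmem : k ∈ (List.range j).filter (fun i => arr.getD i "" = x) :=
    List.mem_filter.mpr ⟨List.mem_range.mpr hk, decide_eq_true hx⟩
  exact pv_getLast_max _ (List.pairwise_lt_range.filter _) i h k hmem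

theorem pvLast_isSome (arr : List String) (j : Nat) (x : String) (i : Nat)
    (hij : i < j) (hx : arr.getD i "" = x) : ∃ i', pvLast arr j x = some i' := by
  have hmem : i ∈ (List.range j).filter (fun i => arr.getD i "" = x) :=
    List.mem_filter.mpr ⟨List.mem_range.mpr hij, decide_eq_true hx⟩
  have hne : (List.range j).filter (fun i => arr.getD i "" = x) ≠ [] :=
    List.ne_nil_of_mem hmem
  rcases Option.isSome_iff_exists.mp (List.getLast?_isSome.mpr hne) with ⟨i', h⟩
  exact ⟨i', h⟩

-- ----- membership elimination for the candidate lists -----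
theorem pv_mem_filterMap_cand (arr : List String) (i a b : Nat) (q : Int × String)
    (h : q ∈ (List.range' a b).filterMap (pvCand arr i)) :
    ∃ j, a ≤ j ∧ j < a + b ∧ arr.getD i "" = arr.getD j "" ∧
      q = ((j : Int) - (i : Int), arr.getD i "") := by
  rcases List.mem_filterMap.mp h with ⟨j, hj, hc⟩
  rcases List.mem_range'_1.mp hj with ⟨h1, h2⟩
  unfold pvCand at hc
  by_cases hgd : arr.getD i "" = arr.getD j ""
  · rw [if_pos hgd] at hc
    exact ⟨j, h1, h2, hgd, by injection hc with h'; exact h'.symm⟩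
  · rw [if_neg hgd] at hc
    exact absurd hc (by simp)

theorem pv_mem_candsA (arr : List String) (q : Int × String) (h : q ∈ pvCandsA arr) :
    ∃ i j, i < j ∧ j < arr.length ∧ arr.getD i "" = arr.getD j "" ∧
      q = ((j : Int) - (i : Int), arr.getD i "") := by
  rcases List.mem_flatMap.mp h with ⟨i, hi, hq⟩
  rcases pv_mem_filterMap_cand arr i _ _ q hq with ⟨j, h1, h2, h3, h4⟩
  exact ⟨i, j, by omega, by simp at hi; omega, h3, h4⟩

theorem pv_mem_gB (arr : List String) (j : Nat) (q : Int × String)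
    (h : q ∈ (match pvLast arr j (arr.getD j "") with
              | some i => [((j : Int) - (i : Int), arr.getD j "")]
              | none => ([] : List (Int × String)))) :
    ∃ i, pvLast arr j (arr.getD j "") = some i ∧ q = ((j : Int) - (i : Int), arr.getD j "") := by
  rcases hl : pvLast arr j (arr.getD j "") with _ | i <;> rw [hl] at h
  · simp at h
  · simp at h; exact ⟨i, rfl, h⟩

theorem pv_mem_candsB (arr : List String) (q : Int × String) (h : q ∈ pvCandsB arr) :
    ∃ j, j < arr.length ∧ ∃ i, pvLast arr j (arr.getD j "") = some i ∧
      q = ((j : Int) - (i : Int), arr.getD j "") := by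
  rcases List.mem_flatMap.mp h with ⟨j, hj, hq⟩
  exact ⟨j, by simpa using hj, pv_mem_gB arr j q hq⟩

-- ----- A's port computes the strict-min fold over pvCandsA -----
theorem pv_pyRange_natCast (a b : Nat) :
    PySem.List.pyRange (a : Int) (b : Int) 1 = (List.range' a (b - a)).map (fun (k : Nat) => (k : Int)) := by
  rw [PySem.List.pyRange_one]
  have ht : ((b : Int) - (a : Int)).toNat = b - a := by omega
  rw [ht, List.range'_eq_map_range, List.map_map]
  exact List.map_congr_left (fun k _ => by simp only [Function.comp_apply]; push_cast; ring)

theorem pv_A_state (arr : List String) (v0 : String) :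
    (PySem.List.pyRange 0 (PySem.List.len arr) 1).foldl (fun (s : Int × String × Bool) i =>
      (PySem.List.pyRange (i+1) (PySem.List.len arr) 1).foldl (fun (s : Int × String × Bool) j =>
        if PySem.List.pyGetD arr i "" = PySem.List.pyGetD arr j "" then
          if j - i < s.1 then (j - i, PySem.List.pyGetD arr i "", true) else s
        else s) s) ((PySem.List.len arr), v0, false)
    = pvEmb (PySem.List.len arr) v0 (pvBest (pvCandsA arr)) := by
  have hlen : PySem.List.len arr = (arr.length : Int) := rfl
  rw [hlen, PySem.List.pyRange_zero_natCast, List.foldl_map]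
  have hb : ∀ p ∈ pvCandsA arr, p.1 < (arr.length : Int) := by
    intro p hp
    rcases pv_mem_candsA arr p hp with ⟨i, j, hij, hjn, _, rfl⟩
    show (j : Int) - (i : Int) < (arr.length : Int)
    omega
  have hrel := pv_rel_fold (pvCandsA arr) (arr.length : Int) v0 none hb
  unfold pvBest
  rw [show pvEmb (arr.length : Int) v0 none = ((arr.length : Int), v0, false) from rfl] at hrel
  rw [← hrel]
  unfold pvCandsA
  rw [List.foldl_flatMap]
  refine PySem.List.foldl_congr_mem _ _ _ _ ?_
  intro s i _
  rw [List.foldl_filterMap]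
  have hcast : ((i : Int) + 1) = ((i + 1 : Nat) : Int) := by push_cast; ring
  rw [hcast, pv_pyRange_natCast (i+1) arr.length, List.foldl_map]
  refine PySem.List.foldl_congr_mem _ _ _ _ ?_
  intro s' j _
  simp only [PySem.List.pyGetD_natCast]
  by_cases h : arr.getD i "" = arr.getD j ""
  · simp only [pvCand, if_pos h, pvAstep]
  · simp only [pvCand, if_neg h]

-- ----- B's port computes the strict-min fold over pvCandsB -----
theorem pvLast_prefix (l : List String) (y : String) (j : Nat) (x : String) (h : j ≤ l.length) :
    pvLast (l ++ [y]) j x = pvLast l j x := by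
  unfold pvLast
  congr 1
  refine List.filter_congr (fun i hi => ?_)
  have : i < l.length := by simp at hi; omega
  rw [List.getD_append _ _ _ _ this]

theorem pv_getD_concat (l : List String) (y : String) : (l ++ [y]).getD l.length "" = y := by
  rw [List.getD_eq_getElem?_getD, List.getElem?_concat_length]; rfl

theorem pvLast_snoc (l : List String) (y : String) (x : String) :
    pvLast (l ++ [y]) (l.length + 1) x = if y = x then some l.length else pvLast l l.length x := by
  unfold pvLast
  rw [List.range_succ, List.filter_append]
  have h1 : (List.range l.length).filter (fun i => (l ++ [y]).getD i "" = x)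
      = (List.range l.length).filter (fun i => l.getD i "" = x) := by
    refine List.filter_congr (fun i hi => ?_)
    have : i < l.length := by simpa using hi
    rw [List.getD_append _ _ _ _ this]
  rw [h1]
  have hg : (l ++ [y]).getD l.length "" = y := pv_getD_concat l y
  by_cases hyx : y = x
  · have h2 : (([l.length]).filter (fun i => (l ++ [y]).getD i "" = x)) = [l.length] := by
      simp [hyx]
    rw [h2, List.getLast?_concat, if_pos hyx]
  · have h2 : (([l.length]).filter (fun i => (l ++ [y]).getD i "" = x)) = [] := by
      simp only [List.filter_cons, List.filter_nil, hg]
      simp [hyx]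
    rw [h2, List.append_nil, if_neg hyx]

theorem pv_candsB_snoc (l : List String) (y : String) :
    pvCandsB (l ++ [y]) = pvCandsB l ++
      (match pvLast l l.length y with
       | some i => [((l.length : Int) - (i : Int), y)]
       | none => []) := by
  unfold pvCandsB
  have hlen : (l ++ [y]).length = l.length + 1 := by simp
  rw [hlen, List.range_succ, List.flatMap_append]
  congr 1
  · refine List.flatMap_congr ?_
    intro j hj
    have hjl : j < l.length := List.mem_range.mp hj
    have hg : (l ++ [y]).getD j "" = l.getD j "" := List.getD_append l [y] "" j hjl
    rw [hg, pvLast_prefix l y j _ (by omega)]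
  · simp only [List.flatMap_cons, List.flatMap_nil, List.append_nil]
    rw [pv_getD_concat, pvLast_prefix l y l.length y (le_refl _)]

theorem pv_B_state (arr : List String) :
    (pvBstate arr).1 = pvBest (pvCandsB arr) ∧
      ∀ x : String, (pvBstate arr).2.get? x = (pvLast arr arr.length x).map (fun (i : Nat) => (i : Int)) := by
  induction arr using List.reverseRecOn with
  | nil =>
    refine ⟨rfl, fun x => rfl⟩
  | append_singleton l y ih =>
    obtain ⟨ih1, ih2⟩ := ih
    have hstate : pvBstate (l ++ [y]) =
        ((match (pvBstate l).2.get? y with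
          | none => (pvBstate l).1
          | some i =>
            match (pvBstate l).1 with
            | none => some ((l.length : Int) - i, y)
            | some b => if (l.length : Int) - i < b.1 then some ((l.length : Int) - i, y) else some b),
         (pvBstate l).2.insert y (l.length : Int)) := by
      unfold pvBstate
      rw [PySem.List.enumerate_append]
      simp only [PySem.List.enumerate_cons, PySem.List.enumerate_nil, zero_add,
        List.foldl_append, List.foldl_cons, List.foldl_nil]
    constructor
    · rw [hstate]
      show (match (pvBstate l).2.get? y with
          | none => (pvBstate l).1
          | some i =>
            match (pvBstate l).1 with
            | none => some ((l.length : Int) - i, y)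
            | some b => if (l.length : Int) - i < b.1 then some ((l.length : Int) - i, y) else some b)
          = pvBest (pvCandsB (l ++ [y]))
      rw [ih2 y, ih1, pv_candsB_snoc]
      cases hpl : pvLast l l.length y with
      | none =>
        simp
      | some i =>
        have hx : pvBest (pvCandsB l ++ [((l.length : Int) - (i : Nat), y)])
            = pvBstep (pvBest (pvCandsB l)) ((l.length : Int) - (i : Nat), y) := by
          unfold pvBest
          rw [List.foldl_append, List.foldl_cons, List.foldl_nil]
        rw [hx]
        cases pvBest (pvCandsB l) with
        | none => rfl
        | some b => rfl
    · intro x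
      rw [hstate]
      show ((pvBstate l).2.insert y (l.length : Int)).get? x
          = (pvLast (l ++ [y]) (l ++ [y]).length x).map (fun (i : Nat) => (i : Int))
      rw [PySem.Dict.get?_insert]
      have hl2 : (l ++ [y]).length = l.length + 1 := by simp
      rw [hl2, pvLast_snoc]
      by_cases hxy : x = y
      · rw [if_pos hxy, if_pos hxy.symm]
        rfl
      · rw [if_neg hxy, if_neg (fun h => hxy h.symm), ih2 x]

-- ----- splitting ranges at a chosen point -----
theorem pv_range'_split (a b k : Nat) (h1 : a ≤ k) (h2 : k < a + b) :
    List.range' a b = List.range' a (k - a) ++ k :: List.range' (k+1) (a + b - (k+1)) := by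
  have h3 : b = (k - a) + (a + b - k) := by omega
  conv_lhs => rw [h3]
  rw [← List.range'_append (s := a) (m := k - a) (n := a + b - k) (step := 1)]
  congr 1
  have h4 : a + 1 * (k - a) = k := by omega
  rw [h4]
  have h5 : a + b - k = (a + b - (k+1)) + 1 := by omega
  rw [h5, List.range'_succ]

theorem pv_range_split (n k : Nat) (h : k < n) :
    List.range n = List.range k ++ k :: List.range' (k+1) (n - (k+1)) := by
  have h0 := pv_range'_split 0 n k (by omega) (by omega)
  rw [List.range_eq_range', List.range_eq_range']
  simpa using h0

-- ----- the two candidate lists have the same strict-min -----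
theorem pv_best_eq (arr : List String) : pvBest (pvCandsA arr) = pvBest (pvCandsB arr) := by
  have hpairP : ∀ i j, i < j → j < arr.length → arr.getD i "" = arr.getD j "" →
      (0 < j - i ∧ ∃ i', i' + (j - i) < arr.length ∧ arr.getD i' "" = arr.getD (i' + (j - i)) "") := by
    intro i j hij hjn hg
    refine ⟨by omega, i, by omega, ?_⟩
    have hji : i + (j - i) = j := by omega
    rw [hji]; exact hg
  by_cases hp : ∃ i j, i < j ∧ j < arr.length ∧ arr.getD i "" = arr.getD j ""
  · -- some value recurs: both lists have the same earliest minimal-gap pair at their head position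
    haveI : DecidablePred (fun d : Nat =>
        0 < d ∧ ∃ i, i + d < arr.length ∧ arr.getD i "" = arr.getD (i + d) "") :=
      fun _ => Classical.propDecidable _
    have hP : ∃ d : Nat, 0 < d ∧ ∃ i, i + d < arr.length ∧ arr.getD i "" = arr.getD (i + d) "" := by
      obtain ⟨i, j, hij, hjn, hg⟩ := hp
      exact ⟨j - i, hpairP i j hij hjn hg⟩
    set m := Nat.find hP with hmdef
    have hm := Nat.find_spec hP
    have hmin : ∀ d, d < m → ¬ (0 < d ∧ ∃ i, i + d < arr.length ∧ arr.getD i "" = arr.getD (i + d) "") :=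
      fun d hd => Nat.find_min hP hd
    haveI : DecidablePred (fun i : Nat => i + m < arr.length ∧ arr.getD i "" = arr.getD (i + m) "") :=
      fun _ => Classical.propDecidable _
    have hQ : ∃ i : Nat, i + m < arr.length ∧ arr.getD i "" = arr.getD (i + m) "" := hm.2
    set i₀ := Nat.find hQ with hi₀def
    have hi₀ := Nat.find_spec hQ
    have hi₀min : ∀ i, i < i₀ → ¬ (i + m < arr.length ∧ arr.getD i "" = arr.getD (i + m) "") :=
      fun i hi => Nat.find_min hQ hi
    have hm0 : 0 < m := hm.1
    have hj₀ : i₀ + m < arr.length := hi₀.1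
    have hge_m : ∀ i j, i < j → j < arr.length → arr.getD i "" = arr.getD j "" → m ≤ j - i := by
      intro i j hij hjn hg
      by_contra hlt
      exact hmin (j - i) (by omega) (hpairP i j hij hjn hg)
    have hd_gt : ∀ i j, i < j → j < arr.length → arr.getD i "" = arr.getD j "" → i < i₀ → m < j - i := by
      intro i j hij hjn hg hii
      have h1 : m ≤ j - i := hge_m i j hij hjn hg
      rcases Nat.lt_or_ge m (j - i) with h | h
      · exact h
      · have hjm : j = i + m := by omega
        exact absurd ⟨by omega, by rw [← hjm]; exact hg⟩ (hi₀min i hii)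
    have hd_gtB : ∀ i j, i < j → j < i₀ + m → arr.getD i "" = arr.getD j "" → m < j - i := by
      intro i j hij hjm hg
      have h1 : m ≤ j - i := hge_m i j hij (by omega) hg
      rcases Nat.lt_or_ge m (j - i) with h | h
      · exact h
      · have hji : i = j - m := by omega
        have hQ' : (j - m) + m < arr.length ∧ arr.getD (j - m) "" = arr.getD ((j - m) + m) "" := by
          constructor
          · omega
          · have e : (j - m) + m = j := by omega
            rw [e, ← hji]; exact hg
        have := Nat.find_min' hQ hQ'
        omega
    -- split of A's candidate list at the pair (i₀, i₀ + m)
    have hsA : pvCandsA arr =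
        ((List.range i₀).flatMap (fun i =>
            (List.range' (i+1) (arr.length - (i+1))).filterMap (pvCand arr i)))
        ++ (((i₀ + m : Nat) : Int) - (i₀ : Int), arr.getD i₀ "") ::
        (((List.range' (i₀+m+1) (arr.length - (i₀+m+1))).filterMap (pvCand arr i₀))
          ++ ((List.range' (i₀+1) (arr.length - (i₀+1))).flatMap (fun i =>
                (List.range' (i+1) (arr.length - (i+1))).filterMap (pvCand arr i)))) := by
      unfold pvCandsA
      rw [pv_range_split arr.length i₀ (by omega), List.flatMap_append, List.flatMap_cons]
      congr 1
      rw [pv_range'_split (i₀+1) (arr.length - (i₀+1)) (i₀+m) (by omega) (by omega)]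
      have e1 : (i₀+1) + (arr.length - (i₀+1)) - ((i₀+m)+1) = arr.length - (i₀+m+1) := by omega
      rw [e1, List.filterMap_append, List.filterMap_cons]
      have hnil : (List.range' (i₀+1) ((i₀+m) - (i₀+1))).filterMap (pvCand arr i₀) = [] := by
        rw [List.filterMap_eq_nil_iff]
        intro j hj
        rcases List.mem_range'_1.mp hj with ⟨hj1, hj2⟩
        unfold pvCand
        rw [if_neg]
        intro hg
        exact hmin (j - i₀) (by omega) (hpairP i₀ j (by omega) (by omega) hg)
      rw [hnil, List.nil_append]
      have hc : pvCand arr i₀ (i₀+m) = some (((i₀ + m : Nat) : Int) - (i₀ : Int), arr.getD i₀ "") := by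
        unfold pvCand
        rw [if_pos hi₀.2]
      rw [hc, List.cons_append]
    -- split of B's candidate list at right endpoint i₀ + m
    have hlast : pvLast arr (i₀+m) (arr.getD (i₀+m) "") = some i₀ := by
      obtain ⟨i', hi'⟩ := pvLast_isSome arr (i₀+m) (arr.getD (i₀+m) "") i₀ (by omega) hi₀.2
      obtain ⟨hi'lt, hi'g⟩ := pvLast_mem arr _ _ i' hi'
      have hge := pvLast_ge arr _ _ i' hi' i₀ (by omega) hi₀.2
      rcases Nat.lt_or_ge i₀ i' with h | h
      · exfalso
        have h1 : m ≤ (i₀+m) - i' := hge_m i' (i₀+m) hi'lt (by omega) hi'g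
        omega
      · have hii : i' = i₀ := by omega
        rw [hii] at hi'
        exact hi'
    have hsB : pvCandsB arr =
        ((List.range (i₀+m)).flatMap (fun j =>
            match pvLast arr j (arr.getD j "") with
            | some i => [((j : Int) - (i : Int), arr.getD j "")]
            | none => []))
        ++ (((i₀ + m : Nat) : Int) - (i₀ : Int), arr.getD (i₀+m) "") ::
        ((List.range' (i₀+m+1) (arr.length - (i₀+m+1))).flatMap (fun j =>
            match pvLast arr j (arr.getD j "") with
            | some i => [((j : Int) - (i : Int), arr.getD j "")]
            | none => [])) := by
      unfold pvCandsB
      rw [pv_range_split arr.length (i₀+m) (by omega), List.flatMap_append, List.flatMap_cons]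
      congr 1
      rw [hlast]
      push_cast
      rfl
    have hbA : pvBest (pvCandsA arr) = some (((i₀ + m : Nat) : Int) - (i₀ : Int), arr.getD i₀ "") := by
      rw [hsA]
      apply pv_best_split
      · intro q hq
        rcases List.mem_flatMap.mp hq with ⟨i, hi, hqi⟩
        have hii : i < i₀ := List.mem_range.mp hi
        rcases pv_mem_filterMap_cand arr i _ _ q hqi with ⟨j, h1, h2, h3, rfl⟩
        have hjn : j < arr.length := by omega
        have hgt := hd_gt i j (by omega) hjn h3 hii
        show ((i₀ + m : Nat) : Int) - (i₀ : Int) < (j : Int) - (i : Int)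
        omega
      · intro q hq
        rcases List.mem_append.mp hq with hq | hq
        · rcases pv_mem_filterMap_cand arr i₀ _ _ q hq with ⟨j, h1, h2, h3, rfl⟩
          show ((i₀ + m : Nat) : Int) - (i₀ : Int) ≤ (j : Int) - (i₀ : Int)
          omega
        · rcases List.mem_flatMap.mp hq with ⟨i, hi, hqi⟩
          rcases List.mem_range'_1.mp hi with ⟨hi1, hi2⟩
          rcases pv_mem_filterMap_cand arr i _ _ q hqi with ⟨j, h1, h2, h3, rfl⟩
          have hjn : j < arr.length := by omega
          have hle := hge_m i j (by omega) hjn h3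
          show ((i₀ + m : Nat) : Int) - (i₀ : Int) ≤ (j : Int) - (i : Int)
          omega
    have hbB : pvBest (pvCandsB arr) = some (((i₀ + m : Nat) : Int) - (i₀ : Int), arr.getD (i₀+m) "") := by
      rw [hsB]
      apply pv_best_split
      · intro q hq
        rcases List.mem_flatMap.mp hq with ⟨j, hj, hqj⟩
        have hjj : j < i₀ + m := List.mem_range.mp hj
        rcases pv_mem_gB arr j q hqj with ⟨i, hl, rfl⟩
        obtain ⟨hij, hg⟩ := pvLast_mem arr j _ i hl
        have hgt := hd_gtB i j hij hjj hg
        show ((i₀ + m : Nat) : Int) - (i₀ : Int) < (j : Int) - (i : Int)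
        omega
      · intro q hq
        rcases List.mem_flatMap.mp hq with ⟨j, hj, hqj⟩
        rcases List.mem_range'_1.mp hj with ⟨hj1, hj2⟩
        rcases pv_mem_gB arr j q hqj with ⟨i, hl, rfl⟩
        obtain ⟨hij, hg⟩ := pvLast_mem arr j _ i hl
        have hle := hge_m i j hij (by omega) hg
        show ((i₀ + m : Nat) : Int) - (i₀ : Int) ≤ (j : Int) - (i : Int)
        omega
    rw [hbA, hbB, hi₀.2]
  · -- nothing recurs: both candidate lists are empty
    have hA : pvCandsA arr = [] := by
      rw [List.eq_nil_iff_forall_not_mem]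
      intro q hq
      rcases pv_mem_candsA arr q hq with ⟨i, j, hij, hjn, hg, _⟩
      exact hp ⟨i, j, hij, hjn, hg⟩
    have hB : pvCandsB arr = [] := by
      rw [List.eq_nil_iff_forall_not_mem]
      intro q hq
      rcases pv_mem_candsB arr q hq with ⟨j, hjn, i, hl, _⟩
      obtain ⟨hij, hg⟩ := pvLast_mem arr j _ i hl
      exact hp ⟨i, j, hij, hjn, hg⟩
    rw [hA, hB]

-- ===== VERDICT (by name: the statement is the Claim_ definition above) =====
theorem first_Recurring_spec : Claim_equal_first_Recurring := by
  intro arr _ _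
  unfold Spec_first_Recurring
  have hA : first_Recurring arr
      = pvOut (pvBest (pvCandsA arr)) := by
    simp only [first_Recurring]
    rw [pv_A_state arr ((PySem.List.pyGet? arr 0).getD "")]
    cases pvBest (pvCandsA arr) <;> simp [pvEmb, pvOut]
  have hB : first_Recurring_alt arr = pvOut (pvBest (pvCandsB arr)) := by
    unfold first_Recurring_alt
    rw [(pv_B_state arr).1]
    cases pvBest (pvCandsB arr) <;> simp [pvOut]
  rw [hA, hB, pv_best_eq]
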